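/- GENERATED by mk_final_copies.py from the proof of the farm's unit `capture_pattern` (farm:capture_pattern.1: Proof.lean) as the
   re-elaboration sweep compiled it — do not edit. -/
import Vorbis.Spec.Units.capture_pattern
import Vorbis.Spec.Worked.capture_pattern_Lemmas

open X86 X86.User Asan Vorbis Vorbis.Spec Vorbis.Spec.capture_pattern

set_option maxRecDepth 4000
set_option maxHeartbeats 16000000

/-- `capture_pattern` satisfies its contract: `push rbx`, four times `call get8 ; cmp al, c ; je/jne`, one `pop rbx ; ret` shared by
the five paths. After every call: `v_after_call`, the step of the function's invariant (`After.step`: `Bits` kept, μ not increased,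
`stream` moved by at most one more; `Matched` while every result was non-zero), and the two stack slots (the return address, the
saved rbx) carried over the callee's footprint. -/
theorem Vorbis.Spec.Worked.capture_pattern_ok : Vorbis.Spec.capture_pattern.Statement := by
  intro Lay hLay μ hμ u₀ hcode hg others frames Blk len u ret he hpre
  v_entry he
  have hg' := hg others frames Blk len
  have hpre' : ReaderPre others frames Blk len u := hpre
  have hsh : ShadowPre others frames u := hpre'.shadow
  -- where the stack and `*f` are: two arithmetic facts
  have hsp := hsh.rsp
  have hwhere := hpre'.where_obj
  -- the invariant after `push rbx` (a store off `*f`), before the first call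
  obtain ⟨hA0, hM0⟩ := After.zero hpre'.bits (u.reg .rsp - 8) (u.reg .rbx).toNat (by u_omega) (by u_omega)
  -- 0x104f00 (stb_vorbis_fixed.c:1459) … the call at 0x104f04 (c:1460)
  u_walk hcode [hμ.vendor] span [Vorbis.L.textLo, Vorbis.L.textHi] side (v_side)
  · v_inv
  · -- the precondition of the first get8: rdi is still `f`
    show ReaderPre others frames Blk len s_104f04
    have w_rdi : s_104f04.reg .rdi = u.reg .rdi := w_kept.get .rdi rfl
    refine hpre'.again (hsh.callee ?_ ?_ ?_ ?_) w_rdi ?_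
    · v_untouched
    · rw [w_rsp]
      u_omega
    · rw [w_rsp]
      u_omega
    · rw [w_rsp]
      u_omega
    · rw [w_mem]
      exact hA0.bits_push _ _ (by u_omega) (by u_omega)
  · -- 0x104f09 (c:1460): after the first get8
    have w_rdi_104f04 : s_104f04.reg .rdi = u.reg .rdi := w_kept_104f04.get .rdi rfl
    v_after_call w_rsp_104f04 w_mem_104f04
    rw [w_rdi_104f04] at w_same
    have hp1 : Get8Post Blk len (u.reg .rdi).toNat s_104f04 s_104f04r := by
      have hp := w_post
      simp only [get8.spec, w_rdi_104f04] at hp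
      exact hp
    obtain ⟨hA1, hM1⟩ := hA0.step (u.reg .rsp - 16) 1068809 (by u_omega) (by u_omega) w_mem_104f04 hp1
    replace hM1 := hM1 hM0
    have hun1 : ShadowUntouched u.mem s_104f04r.mem := by v_untouched
    -- the two stack slots the rest needs: the return address, the saved rbx
    have hs0 : UInt64.ofNat (s_104f04r.mem.readLE (u.reg .rsp) 8) = ret := by
      u_frame he_retAddr
    have hs1 : UInt64.ofNat (s_104f04r.mem.readLE (u.reg .rsp - 8) 8) = u.reg .rbx := by
      have h0 : ((u.mem.writeLE (u.reg Reg.rsp - 8) 8 (UInt64.toNat (u.reg Reg.rbx))).writeLE (u.reg Reg.rsp - 16) 8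
          1068809).readLE (u.reg .rsp - 8) 8 = (u.reg .rbx).toNat := by
        u_read
      have h1 := Mem.readLE_frame (ν := s_104f04r.mem) h0 (by u_eqon) (by u_omega)
      rw [h1]
      exact UInt64.ofNat_toNat
    clear hp1 hA0 hM0
    u_walk hcode [hμ.vendor] span [Vorbis.L.textLo, Vorbis.L.textHi] side (v_side)
    · v_inv
    · -- the precondition of the second get8: `mov rdi, rbx`
      show ReaderPre others frames Blk len s_104f17
      refine hpre'.again (hsh.callee ?_ ?_ ?_ ?_) w_rdi ?_
      · v_untouched
      · rw [w_rsp]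
        u_omega
      · rw [w_rsp]
        u_omega
      · rw [w_rsp]
        u_omega
      · rw [w_mem]
        exact hA1.bits_push _ _ (by u_omega) (by u_omega)
    · -- 0x104f1c (c:1461): after the second get8
      v_after_call w_rsp_104f17 w_mem_104f17
      rw [w_rdi_104f17] at w_same
      have hp2 : Get8Post Blk len (u.reg .rdi).toNat s_104f17 s_104f17r := by
        have hp := w_post
        simp only [get8.spec, w_rdi_104f17] at hp
        exact hp
      obtain ⟨hA2, hM2⟩ := hA1.step (u.reg .rsp - 16) 1068828 (by u_omega) (by u_omega) w_mem_104f17 hp2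
      replace hM2 := hM2 (hM1 (ne_zero_of_low_byte _ _ hbr_104f0b (by decide)))
      have hun2 : ShadowUntouched u.mem s_104f17r.mem := by v_untouched
      -- the two stack slots the rest needs: the return address, the saved rbx
      replace hs0 : UInt64.ofNat (s_104f17r.mem.readLE (u.reg .rsp) 8) = ret := by
        u_frame hs0
      replace hs1 : UInt64.ofNat (s_104f17r.mem.readLE (u.reg .rsp - 8) 8) = u.reg .rbx := by
        u_frame hs1
      clear hp2 hA1 hM1
      u_walk hcode [hμ.vendor] span [Vorbis.L.textLo, Vorbis.L.textHi] side (v_side)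
      · v_inv
      · -- the precondition of the third get8: `mov rdi, rbx`
        show ReaderPre others frames Blk len s_104f2a
        refine hpre'.again (hsh.callee ?_ ?_ ?_ ?_) w_rdi ?_
        · v_untouched
        · rw [w_rsp]
          u_omega
        · rw [w_rsp]
          u_omega
        · rw [w_rsp]
          u_omega
        · rw [w_mem]
          exact hA2.bits_push _ _ (by u_omega) (by u_omega)
      · -- 0x104f2f (c:1462): after the third get8
        v_after_call w_rsp_104f2a w_mem_104f2a
        rw [w_rdi_104f2a] at w_same
        have hp3 : Get8Post Blk len (u.reg .rdi).toNat s_104f2a s_104f2ar := by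
          have hp := w_post
          simp only [get8.spec, w_rdi_104f2a] at hp
          exact hp
        obtain ⟨hA3, hM3⟩ := hA2.step (u.reg .rsp - 16) 1068847 (by u_omega) (by u_omega) w_mem_104f2a hp3
        replace hM3 := hM3 (hM2 (ne_zero_of_low_byte _ _ hbr_104f1e (by decide)))
        have hun3 : ShadowUntouched u.mem s_104f2ar.mem := by v_untouched
        -- the two stack slots the rest needs: the return address, the saved rbx
        replace hs0 : UInt64.ofNat (s_104f2ar.mem.readLE (u.reg .rsp) 8) = ret := by
          u_frame hs0
        replace hs1 : UInt64.ofNat (s_104f2ar.mem.readLE (u.reg .rsp - 8) 8) = u.reg .rbx := by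
          u_frame hs1
        clear hp3 hA2 hM2
        u_walk hcode [hμ.vendor] span [Vorbis.L.textLo, Vorbis.L.textHi] side (v_side)
        · v_inv
        · -- the precondition of the fourth get8: `mov rdi, rbx`
          show ReaderPre others frames Blk len s_104f3d
          refine hpre'.again (hsh.callee ?_ ?_ ?_ ?_) w_rdi ?_
          · v_untouched
          · rw [w_rsp]
            u_omega
          · rw [w_rsp]
            u_omega
          · rw [w_rsp]
            u_omega
          · rw [w_mem]
            exact hA3.bits_push _ _ (by u_omega) (by u_omega)
        · -- 0x104f42 (c:1463): after the fourth get8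
          v_after_call w_rsp_104f3d w_mem_104f3d
          rw [w_rdi_104f3d] at w_same
          have hp4 : Get8Post Blk len (u.reg .rdi).toNat s_104f3d s_104f3dr := by
            have hp := w_post
            simp only [get8.spec, w_rdi_104f3d] at hp
            exact hp
          obtain ⟨hA4, hM4⟩ := hA3.step (u.reg .rsp - 16) 1068866 (by u_omega) (by u_omega) w_mem_104f3d hp4
          replace hM4 := hM4 (hM3 (ne_zero_of_low_byte _ _ hbr_104f31 (by decide)))
          have hun4 : ShadowUntouched u.mem s_104f3dr.mem := by v_untouched
          -- the two stack slots the rest needs: the return address, the saved rbx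
          replace hs0 : UInt64.ofNat (s_104f3dr.mem.readLE (u.reg .rsp) 8) = ret := by
            u_frame hs0
          replace hs1 : UInt64.ofNat (s_104f3dr.mem.readLE (u.reg .rsp - 8) 8) = u.reg .rbx := by
            u_frame hs1
          clear hp4 hA3 hM3
          u_walk hcode [hμ.vendor] span [Vorbis.L.textLo, Vorbis.L.textHi] side (v_side)
          · -- 0x104f13 (c:1465): the fourth byte did not match: eax = 0
            refine ReachVia.done ?_
            v_returned
            show CapturePost Blk len (u.reg .rdi).toNat u s_104f13
            rw [← w_mem] at hA4 hun4
            exact hA4.post (by decide) hun4 (Or.inl w_rax)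
          · -- 0x104f13 (c:1464, 1465): four matches: eax = 1, every result was non-zero
            refine ReachVia.done ?_
            v_returned
            show CapturePost Blk len (u.reg .rdi).toNat u s_104f13
            have hM4' := hM4 (ne_zero_of_low_byte _ _ hbr_104f44 (by decide))
            rw [← w_mem] at hA4 hun4 hM4'
            exact hA4.post (by decide) hun4 (Or.inr ⟨w_rax, hM4'⟩)
        · -- 0x104f13 (c:1465): the third byte did not match: eax = 0
          refine ReachVia.done ?_
          v_returned
          show CapturePost Blk len (u.reg .rdi).toNat u s_104f13
          rw [← w_mem] at hA3 hun3
          exact hA3.post (by decide) hun3 (Or.inl w_rax)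
      · -- 0x104f13 (c:1465): the second byte did not match: eax = 0
        refine ReachVia.done ?_
        v_returned
        show CapturePost Blk len (u.reg .rdi).toNat u s_104f13
        rw [← w_mem] at hA2 hun2
        exact hA2.post (by decide) hun2 (Or.inl w_rax)
    · -- 0x104f13 (c:1465): the first byte did not match: eax = 0
      refine ReachVia.done ?_
      v_returned
      show CapturePost Blk len (u.reg .rdi).toNat u s_104f13
      rw [← w_mem] at hA1 hun1
      exact hA1.post (by decide) hun1 (Or.inl w_rax)
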